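-- pv_equiv track=rewrite | github.com/DSLuGu/nlp_and_recommender_system | week_03/python/relation_keyword.py | _cal_TF
-- ===== SOURCE A (Python) =====
-- from collections import defaultdict, OrderedDict
--
-- def _cal_TF(nounsMap:dict, newsMap:dict):
--
--     sectKwdCntMap = defaultdict(dict)
--     for pk in nounsMap.keys():
--         vo = newsMap.get(pk)
--
--         kwdCntMap = OrderedDict()
--         if vo['section'] in sectKwdCntMap.keys():
--             kwdCntMap = sectKwdCntMap.get(vo['section'])
--
--         itemNounMap = nounsMap.get(pk)
--         for field in itemNounMap.keys():
--             nounList = itemNounMap.get(field)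
--
--             for noun in nounList:
--                 if noun in kwdCntMap.keys():
--                     kwdCntMap[noun] += 1
--                 else:
--                     kwdCntMap[noun] = 1
--
--         sectKwdCntMap[vo['section']] = kwdCntMap
--
--     return sectKwdCntMap
-- ===== SOURCE B (Python) =====
-- from collections import defaultdict, OrderedDict
--
-- def _cal_TF(nounsMap: dict, newsMap: dict):
--     # Pass 1: ordered list of the distinct sections, in first-occurrence order.
--     sections = []
--     for pk in nounsMap:
--         s = newsMap.get(pk)['section']
--         if s not in sections:
--             sections.append(s)
--     # Pass 2: per section, rescan nounsMap, flatten that section's nouns, count in order.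
--     sectKwdCntMap = defaultdict(dict)
--     for s in sections:
--         kwdCntMap = OrderedDict()
--         for pk in nounsMap:
--             if newsMap.get(pk)['section'] != s:
--                 continue
--             for nounList in nounsMap[pk].values():
--                 for noun in nounList:
--                     kwdCntMap[noun] = kwdCntMap.get(noun, 0) + 1
--         sectKwdCntMap[s] = kwdCntMap
--     return sectKwdCntMap
-- ===== Notes on version B (the rewrite author's own statement) =====
-- stated objective: alternative
-- what changed: A builds the section-to-counter map incrementally in one interleaved pass, merging each item's nouns into the section's existing counter; B first collects the distinct sections in first-occurrence order and then, per section, rescans nounsMap to flatten and count that section's nouns in one go.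
import Mathlib
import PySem

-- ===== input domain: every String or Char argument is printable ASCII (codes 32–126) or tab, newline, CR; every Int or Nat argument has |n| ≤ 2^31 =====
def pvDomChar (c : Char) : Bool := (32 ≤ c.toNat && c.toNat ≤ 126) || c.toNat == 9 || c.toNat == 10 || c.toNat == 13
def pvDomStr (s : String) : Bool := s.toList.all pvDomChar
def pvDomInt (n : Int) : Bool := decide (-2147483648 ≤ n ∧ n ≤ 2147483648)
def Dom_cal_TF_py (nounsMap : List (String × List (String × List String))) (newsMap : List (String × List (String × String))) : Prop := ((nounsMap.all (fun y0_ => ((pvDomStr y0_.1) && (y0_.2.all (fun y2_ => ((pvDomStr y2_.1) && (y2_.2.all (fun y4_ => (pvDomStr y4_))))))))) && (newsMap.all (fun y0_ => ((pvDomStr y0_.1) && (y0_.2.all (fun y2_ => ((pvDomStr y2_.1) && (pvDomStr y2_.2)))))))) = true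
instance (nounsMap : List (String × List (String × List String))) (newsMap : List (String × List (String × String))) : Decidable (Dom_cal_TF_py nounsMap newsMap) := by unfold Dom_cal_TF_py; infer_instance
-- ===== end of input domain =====

-- B replaces A's single interleaved pass (merging each item's nouns into its section's growing counter)
-- by: first list the distinct sections in first-occurrence order, then per section rescan nounsMap and
-- count that section's flattened nouns; same return value, objective: alternative (no speed claim).

-- ===== PORT A =====
-- A's counting branch: `if noun in kwdCntMap: kwdCntMap[noun] += 1 else: kwdCntMap[noun] = 1`
def pvACount (c : PySem.Dict String Int) (noun : String) : PySem.Dict String Int :=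
  if c.contains noun then c.insert noun (c.getD noun 0 + 1) else c.insert noun 1

-- A's loop body for one pk (dict iteration yields the key together with its value, keys being unique)
def pvAStep (wd : PySem.Dict String (List (String × String)))
    (sect : PySem.Dict String (PySem.Dict String Int))
    (pkv : String × List (String × List String)) : PySem.Dict String (PySem.Dict String Int) :=
  let vo := PySem.Dict.ofList ((wd.get? pkv.1).getD [])   -- vo = newsMap.get(pk); [] default only outside Pre_
  let s := vo.getD "section" ""                            -- vo['section']; "" default only outside Pre_
  let kwdCntMap := if sect.contains s then sect.getD s PySem.Dict.empty else PySem.Dict.empty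
  let itemNounMap := PySem.Dict.ofList pkv.2
  let kwd := itemNounMap.items.foldl (fun kwd fv => fv.2.foldl pvACount kwd) kwdCntMap
  sect.insert s kwd

def cal_TF_py (nounsMap : List (String × List (String × List String))) (newsMap : List (String × List (String × String))) : List (String × List (String × Int)) :=
  let wd := PySem.Dict.ofList newsMap
  let sect := (PySem.Dict.ofList nounsMap).items.foldl (pvAStep wd) PySem.Dict.empty
  sect.items.map (fun p => (p.1, p.2.items))

-- ===== PORT B =====
-- newsMap.get(pk)['section']  (B looks it up afresh wherever Source B does)
def pvSec (wd : PySem.Dict String (List (String × String))) (pk : String) : String :=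
  (PySem.Dict.ofList ((wd.get? pk).getD [])).getD "section" ""

-- the flattened comprehension `for nounList in nounsMap[pk].values() for noun in nounList`
def pvNouns (fields : List (String × List String)) : List String :=
  (PySem.Dict.ofList fields).values.flatten

def cal_TF_py_alt (nounsMap : List (String × List (String × List String))) (newsMap : List (String × List (String × String))) : List (String × List (String × Int)) :=
  let wd := PySem.Dict.ofList newsMap
  let items := (PySem.Dict.ofList nounsMap).items
  -- pass 1: `if s not in sections: sections.append(s)` = first-occurrence dedup = PySem.Set.ofList
  let sections : PySem.Set String := PySem.Set.ofList (items.map (fun pkv => pvSec wd pkv.1))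
  -- pass 2: per section, skip (`continue`) foreign items, count the rest's nouns in order
  sections.map (fun s =>
    (s, (((items.filter (fun pkv => pvSec wd pkv.1 == s)).flatMap (fun pkv => pvNouns pkv.2)).foldl
          (fun c noun => c.insert noun (c.getD noun 0 + 1)) PySem.Dict.empty).items))

-- ===== PRECONDITION & SPEC =====
-- Pre_ excludes exactly the inputs where Python A raises: some key of nounsMap is missing from newsMap
-- (TypeError on None['section']) or its news record has no 'section' key (KeyError).
def Pre_cal_TF_py (nounsMap : List (String × List (String × List String))) (newsMap : List (String × List (String × String))) : Prop :=
  nounsMap.all (fun p =>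
    match (PySem.Dict.ofList newsMap).get? p.1 with
    | some vo => (PySem.Dict.ofList vo).contains "section"
    | none => false) = true
instance (nounsMap : List (String × List (String × List String))) (newsMap : List (String × List (String × String))) : Decidable (Pre_cal_TF_py nounsMap newsMap) := by unfold Pre_cal_TF_py; infer_instance

def pvWitness_cal_TF_py : (List (String × List (String × List String))) × (List (String × List (String × String))) :=
  ([("p1", [("title", ["cat", "dog", "cat"])]), ("p2", [("body", ["dog"])])],
   [("p1", [("section", "news")]), ("p2", [("section", "news")])])

def Spec_cal_TF_py (nounsMap : List (String × List (String × List String))) (newsMap : List (String × List (String × String))) (out : List (String × List (String × Int))) : Prop := out = cal_TF_py_alt nounsMap newsMap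
instance (nounsMap : List (String × List (String × List String))) (newsMap : List (String × List (String × String))) (out : List (String × List (String × Int))) : Decidable (Spec_cal_TF_py nounsMap newsMap out) := by unfold Spec_cal_TF_py; infer_instance

-- ===== CLAIM (what is proved, stated in full; the proofs are below) =====
def Claim_equal_cal_TF_py : Prop := ∀ (nounsMap : List (String × List (String × List String))) (newsMap : List (String × List (String × String))), Dom_cal_TF_py nounsMap newsMap → Pre_cal_TF_py nounsMap newsMap → Spec_cal_TF_py nounsMap newsMap (cal_TF_py nounsMap newsMap)

-- ===== LEMMAS AND PROOFS =====

-- proof-side grouping fold: what A's pass accumulates, seen as section → list of nouns so far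
def pvGrp (wd : PySem.Dict String (List (String × String)))
    (g : PySem.Dict String (List String))
    (pkv : String × List (String × List String)) : PySem.Dict String (List String) :=
  g.modify (pvSec wd pkv.1) [] (· ++ pvNouns pkv.2)

-- counting a list in order (B's inner fold)
def pvBCount (ns : List String) : PySem.Dict String Int :=
  ns.foldl (fun c noun => c.insert noun (c.getD noun 0 + 1)) PySem.Dict.empty

-- the value map relating the grouping state to A's counting state
def pvF (p : String × List String) : String × PySem.Dict String Int := (p.1, pvBCount p.2)

theorem pvACount_eq (c : PySem.Dict String Int) (n : String) :
    pvACount c n = c.insert n (c.getD n 0 + 1) := by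
  unfold pvACount
  split
  · rfl
  · rename_i h
    rw [PySem.Dict.getD_of_not_contains c 0 (by simpa using h)]
    norm_num

theorem pv_contains_map (g : PySem.Dict String (List String)) (s : String) :
    (PySem.Dict.mk (g.items.map pvF)).contains s = g.contains s := by
  simp [PySem.Dict.contains, List.any_map, Function.comp_def, pvF]

theorem pv_get?_map (g : PySem.Dict String (List String)) (s : String) :
    (PySem.Dict.mk (g.items.map pvF)).get? s = (g.get? s).map pvBCount := by
  simp [PySem.Dict.get?, List.find?_map, Function.comp_def, pvF]

theorem pv_foldl_flatten {α β : Type} (L : List (List α)) (h : β → α → β) (c : β) :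
    L.foldl (fun b nl => nl.foldl h b) c = L.flatten.foldl h c := by
  induction L generalizing c with
  | nil => rfl
  | cons x xs ih => simp [List.foldl_append, ih]

theorem pv_insert_map (g : PySem.Dict String (List String)) (s : String) (v : List String) :
    (PySem.Dict.mk (g.items.map pvF)).insert s (pvBCount v) = PySem.Dict.mk ((g.insert s v).items.map pvF) := by
  unfold PySem.Dict.insert
  rw [pv_contains_map]
  split
  · simp only [List.map_map]
    congr 1
    apply List.map_congr_left
    intro p _
    by_cases hp : p.1 = s <;> simp [pvF, hp]
  · simp [pvF]

theorem pvBCount_append (l ns : List String) :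
    pvBCount (l ++ ns) = ns.foldl (fun c noun => c.insert noun (c.getD noun 0 + 1)) (pvBCount l) := by
  unfold pvBCount
  rw [List.foldl_append]

theorem pv_double_fold (items2 : List (String × List String)) (c : PySem.Dict String Int) :
    items2.foldl (fun kwd fv => fv.2.foldl pvACount kwd) c
      = ((items2.map (·.2)).flatten).foldl (fun c noun => c.insert noun (c.getD noun 0 + 1)) c := by
  have h1 : items2.foldl (fun kwd fv => fv.2.foldl pvACount kwd) c
      = (items2.map (·.2)).foldl (fun b nl => nl.foldl pvACount b) c := by
    rw [List.foldl_map]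
  have h3 : pvACount = fun c noun => c.insert noun (c.getD noun 0 + 1) := by
    funext c n; exact pvACount_eq c n
  rw [h1, pv_foldl_flatten, h3]

theorem pvStep_core (g : PySem.Dict String (List String)) (s : String) (ns : List String) :
    (PySem.Dict.mk (g.items.map pvF)).insert s
      (ns.foldl (fun c noun => c.insert noun (c.getD noun 0 + 1))
        (if (PySem.Dict.mk (g.items.map pvF)).contains s then
          (PySem.Dict.mk (g.items.map pvF)).getD s PySem.Dict.empty else PySem.Dict.empty))
      = PySem.Dict.mk ((g.modify s [] (· ++ ns)).items.map pvF) := by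
  have hkwd0 : (if (PySem.Dict.mk (g.items.map pvF)).contains s then
        (PySem.Dict.mk (g.items.map pvF)).getD s PySem.Dict.empty else PySem.Dict.empty)
      = pvBCount (g.getD s []) := by
    rw [pv_contains_map]
    by_cases hc : g.contains s = true
    · rw [if_pos hc]
      rcases Option.isSome_iff_exists.mp (by rw [← PySem.Dict.contains_eq_isSome_get? g s]; exact hc) with ⟨w, hw⟩
      simp only [PySem.Dict.getD, pv_get?_map, hw, Option.map_some, Option.getD_some]
    · rw [if_neg hc]
      rw [PySem.Dict.getD_of_not_contains g [] (by simpa using hc)]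
      rfl
  rw [hkwd0, ← pvBCount_append]
  have hmod : g.modify s [] (· ++ ns) = g.insert s (g.getD s [] ++ ns) := rfl
  rw [hmod, pv_insert_map]

theorem pvStep_eq (wd : PySem.Dict String (List (String × String)))
    (g : PySem.Dict String (List String)) (pkv : String × List (String × List String)) :
    pvAStep wd (PySem.Dict.mk (g.items.map pvF)) pkv = PySem.Dict.mk ((pvGrp wd g pkv).items.map pvF) := by
  simp only [pvAStep, pvGrp]
  rw [pv_double_fold]
  exact pvStep_core g (pvSec wd pkv.1) (pvNouns pkv.2)

theorem pvInv (wd : PySem.Dict String (List (String × String)))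
    (l : List (String × List (String × List String))) (g : PySem.Dict String (List String)) :
    l.foldl (pvAStep wd) (PySem.Dict.mk (g.items.map pvF))
      = PySem.Dict.mk ((l.foldl (pvGrp wd) g).items.map pvF) := by
  induction l generalizing g with
  | nil => rfl
  | cons x xs ih =>
    simp only [List.foldl_cons, pvStep_eq]
    exact ih (pvGrp wd g x)

-- the grouping fold's lookups: append-modify over a keyed list = filter-then-flatten
theorem pv_getD_grp {α : Type} (key : α → String) (val : α → List String)
    (l : List α) (g : PySem.Dict String (List String)) (c : String) :
    (l.foldl (fun g p => g.modify (key p) [] (fun x => x ++ val p)) g).getD c []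
      = g.getD c [] ++ (l.filter (fun p => key p == c)).flatMap val := by
  induction l generalizing g with
  | nil => simp
  | cons x xs ih =>
    simp only [List.foldl_cons, List.filter_cons, ih]
    by_cases hx : key x = c
    · simp [hx]
    · have : (key x == c) = false := by simpa using hx
      simp [this, PySem.Dict.getD_modify, Ne.symm hx]

theorem cal_TF_py_spec : Claim_equal_cal_TF_py := by
  intro nounsMap newsMap _ _
  unfold Spec_cal_TF_py
  simp only [cal_TF_py, cal_TF_py_alt]
  set wd := PySem.Dict.ofList newsMap with hwd
  set items := (PySem.Dict.ofList nounsMap).items with hitems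
  have h1 : items.foldl (pvAStep wd) PySem.Dict.empty
      = PySem.Dict.mk ((items.foldl (pvGrp wd) PySem.Dict.empty).items.map pvF) :=
    pvInv wd items PySem.Dict.empty
  set grp := items.foldl (pvGrp wd) PySem.Dict.empty with hgrp
  have hkeys : grp.keys = PySem.Set.ofList (items.map (fun pkv => pvSec wd pkv.1)) := by
    rw [hgrp]
    have h := PySem.Dict.keys_foldl_modify_key items (fun pkv => pvSec wd pkv.1)
        ([] : List String) (fun _ pkv => (· ++ pvNouns pkv.2)) PySem.Dict.empty
    simpa [pvGrp, PySem.Dict.keys_empty, PySem.Set.update_nil_left] using h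
  have hnodup : grp.keys.Nodup := by
    rw [hkeys]; exact PySem.Set.nodup_ofList _
  have hitemsg : grp.items = grp.keys.map (fun k => (k, grp.getD k [])) :=
    PySem.Dict.items_eq_map_keys grp hnodup []
  have hgetD : ∀ c, grp.getD c []
      = (items.filter (fun pkv => pvSec wd pkv.1 == c)).flatMap (fun pkv => pvNouns pkv.2) := by
    intro c
    have h := pv_getD_grp (fun pkv => pvSec wd pkv.1) (fun pkv => pvNouns pkv.2)
        items PySem.Dict.empty c
    simpa [pvGrp, PySem.Dict.getD_empty] using h
  rw [h1]
  show (PySem.Dict.mk (grp.items.map pvF)).items.map (fun p => (p.1, p.2.items)) = _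
  rw [hitemsg, hkeys]
  simp only [List.map_map, Function.comp_def, pvF]
  refine List.map_congr_left ?_
  intro s _
  rw [hgetD s]
  rfl
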